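-- pv_equiv track=rewrite | github.com/aorursy/KT_dataset_py | mykolarobotyshyn_prepare-data-to-ml-algorithms.py | transform_to_sum_5
-- ===== SOURCE A (Python) =====
-- def transform_to_sum_5(points):
--
--     '''
--
--     :param points: array, where el=how many points team earned in match
--
--     :return: each el=points in last 5 match (ex: i=10, array[10]=sum(array[9]+array[8]+...array[5]))
--
--     '''
--
--     last_5_points = [0]
--
--     for i in range(1, len(points)):
--
--         if i < 5:
--
--             last_5_points.append(sum(points[:i]))
--
--         else:
--
--             last_5_points.append(sum(points[i - 5:i]))
--
--     return last_5_points
-- ===== SOURCE B (Python) =====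
-- def transform_to_sum_5(points):
--     '''Trailing-5-window sums, seeded with [0]: one pass with a running window total.'''
--     last_5_points = [0]
--     s = 0
--     for i in range(1, len(points)):
--         s += points[i - 1]
--         if i > 5:
--             s -= points[i - 6]
--         last_5_points.append(s)
--     return last_5_points
-- ===== Notes on version B (the rewrite author's own statement) =====
-- stated objective: faster
-- what changed: Replaces re-summing a fresh slice on every iteration with a single running window total that adds the entering element and subtracts the leaving one.
import Mathlib
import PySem

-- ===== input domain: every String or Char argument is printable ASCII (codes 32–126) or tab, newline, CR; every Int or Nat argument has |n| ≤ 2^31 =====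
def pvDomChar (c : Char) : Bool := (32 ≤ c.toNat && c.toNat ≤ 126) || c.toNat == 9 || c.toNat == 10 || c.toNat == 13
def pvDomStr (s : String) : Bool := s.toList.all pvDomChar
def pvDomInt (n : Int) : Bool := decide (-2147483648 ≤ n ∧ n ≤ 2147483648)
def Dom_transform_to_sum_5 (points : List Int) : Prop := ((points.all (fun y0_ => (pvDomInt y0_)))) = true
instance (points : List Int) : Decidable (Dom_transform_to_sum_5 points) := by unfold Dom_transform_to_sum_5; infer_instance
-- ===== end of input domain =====

-- B replaces per-iteration slice re-summation with a one-pass running window total (objective: faster, constant-factor).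

-- ===== PORT A =====
-- A: seed [0]; for i in range(1, len): append sum(points[:i]) if i < 5 else sum(points[i-5:i]).
def transform_to_sum_5 (points : List Int) : List Int :=
  (PySem.List.pyRange 1 points.length 1).foldl
    (fun acc i =>
      if i < 5 then acc ++ [(PySem.List.slice points none (some i)).sum]
      else acc ++ [(PySem.List.slice points (some (i - 5)) (some i)).sum])
    [0]

-- ===== PORT B =====
-- B: same loop bounds, but a running total s; s += points[i-1], and s -= points[i-6] when i > 5.
-- pyGetD is exact here: every index used is in range for every iteration of the loop.
def transform_to_sum_5_alt (points : List Int) : List Int :=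
  (((PySem.List.pyRange 1 points.length 1).foldl
    (fun (st : List Int × Int) i =>
      let s1 := st.2 + PySem.List.pyGetD points (i - 1) 0
      let s2 := if 5 < i then s1 - PySem.List.pyGetD points (i - 6) 0 else s1
      (st.1 ++ [s2], s2))
    ([0], 0))).1

-- ===== PRECONDITION & SPEC =====
def Spec_transform_to_sum_5 (points : List Int) (out : List Int) : Prop := out = transform_to_sum_5_alt points
instance (points : List Int) (out : List Int) : Decidable (Spec_transform_to_sum_5 points out) := by unfold Spec_transform_to_sum_5; infer_instance

-- ===== CLAIM (what is proved, stated in full; the proofs are below) =====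
def Claim_equal_transform_to_sum_5 : Prop := ∀ (points : List Int), Dom_transform_to_sum_5 points → Spec_transform_to_sum_5 points (transform_to_sum_5 points)

-- ===== LEMMAS AND PROOFS =====

-- prefix sum of the first k elements
def pfx (pts : List Int) (k : Nat) : Int := (pts.take k).sum

-- the trailing-5 window sum ending just before position k
def win (pts : List Int) (k : Nat) : Int := pfx pts k - pfx pts (k - 5)

theorem sum_drop_take (pts : List Int) (a b : Nat) (hab : a ≤ b) :
    ((pts.take b).drop a).sum = pfx pts b - pfx pts a := by
  have h : pts.take b = (pts.take b).take a ++ (pts.take b).drop a := (List.take_append_drop a (pts.take b)).symm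
  have h2 : (pts.take b).take a = pts.take a := by
    rw [List.take_take, Nat.min_eq_left hab]
  have := congrArg List.sum h
  rw [List.sum_append, h2] at this
  unfold pfx
  omega

theorem pfx_succ (pts : List Int) (k : Nat) (hk : k < pts.length) :
    pfx pts (k + 1) = pfx pts k + pts[k] := by
  unfold pfx
  rw [List.take_add_one, List.sum_append, List.getElem?_eq_getElem hk]
  simp

theorem foldl_ite_append (l : List Int) (p : Int → Prop) [DecidablePred p]
    (f g : Int → Int) (acc : List Int) :
    l.foldl (fun acc i => if p i then acc ++ [f i] else acc ++ [g i]) acc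
      = acc ++ l.map (fun i => if p i then f i else g i) := by
  induction l generalizing acc with
  | nil => simp
  | cons x t ih =>
    simp only [List.foldl_cons, List.map_cons]
    split_ifs with h <;> rw [ih] <;> simp

theorem A_char (pts : List Int) :
    transform_to_sum_5 pts
      = [0] ++ (List.range (pts.length - 1)).map (fun k => win pts (k + 1)) := by
  unfold transform_to_sum_5
  rw [foldl_ite_append]
  congr 1
  rw [PySem.List.pyRange_one, List.map_map]
  have hlen : ((pts.length : Int) - 1).toNat = pts.length - 1 := by omega
  rw [hlen]
  apply List.map_congr_left
  intro k hk
  have hk' : k < pts.length - 1 := List.mem_range.mp hk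
  have hkl : k + 1 < pts.length := by omega
  simp only [Function.comp]
  by_cases h5 : (1 : Int) + k < 5
  · rw [if_pos h5]
    have hc : (1 : Int) + ↑k = ((k + 1 : Nat) : Int) := by omega
    rw [hc, PySem.List.slice_to_natCast]
    unfold win
    have : k + 1 - 5 = 0 := by omega
    rw [this]
    simp [pfx]
  · rw [if_neg h5]
    have h1 : (1 : Int) + ↑k - 5 = ((k - 4 : Nat) : Int) := by omega
    have h2 : (1 : Int) + ↑k = ((k + 1 : Nat) : Int) := by omega
    rw [h1, h2, PySem.List.slice_natCast, ← List.drop_take, sum_drop_take pts _ _ (by omega)]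
    unfold win
    have : k + 1 - 5 = k - 4 := by omega
    rw [this]

theorem B_invariant (pts : List Int) (m : Nat) (hm : m + 1 ≤ pts.length) :
    (PySem.List.pyRange 1 (1 + (m : Int)) 1).foldl
      (fun (st : List Int × Int) i =>
        let s1 := st.2 + PySem.List.pyGetD pts (i - 1) 0
        let s2 := if 5 < i then s1 - PySem.List.pyGetD pts (i - 6) 0 else s1
        (st.1 ++ [s2], s2))
      ([0], 0)
    = ([0] ++ (List.range m).map (fun k => win pts (k + 1)), win pts m) := by
  induction m with
  | zero =>
    rw [PySem.List.pyRange_one_eq_nil (by omega)]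
    simp [win, pfx]
  | succ n ih =>
    have hn : n + 1 ≤ pts.length := by omega
    have h1 : (1 : Int) + ((n + 1 : Nat) : Int) = (1 + (n : Int)) + 1 := by push_cast; ring
    rw [h1, PySem.List.pyRange_one_succ_right (by omega), List.foldl_append, ih hn]
    have hidx : (1 : Int) + ↑n - 1 = ((n : Nat) : Int) := by omega
    have hget1 : PySem.List.pyGetD pts ((1 : Int) + ↑n - 1) 0 = pts[n]'(by omega) := by
      rw [hidx, PySem.List.pyGetD_natCast, List.getD_eq_getElem]
    have hS : (if (5 : Int) < 1 + ↑n
          then win pts n + PySem.List.pyGetD pts (1 + ↑n - 1) 0 - PySem.List.pyGetD pts (1 + ↑n - 6) 0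
          else win pts n + PySem.List.pyGetD pts (1 + ↑n - 1) 0) = win pts (n + 1) := by
      split_ifs with h5
      · have hn5 : 5 ≤ n := by omega
        have hidx2 : (1 : Int) + ↑n - 6 = ((n - 5 : Nat) : Int) := by omega
        rw [hget1, hidx2, PySem.List.pyGetD_natCast, List.getD_eq_getElem _ _ (by omega)]
        unfold win
        rw [pfx_succ pts n (by omega)]
        have h6 : n + 1 - 5 = (n - 5) + 1 := by omega
        rw [h6, pfx_succ pts (n - 5) (by omega)]
        ring
      · have hn5 : n < 5 := by omega
        rw [hget1]
        unfold win
        rw [pfx_succ pts n (by omega)]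
        have e1 : n - 5 = 0 := by omega
        have e2 : n + 1 - 5 = 0 := by omega
        rw [e1, e2]
        ring
    simp only [List.foldl_cons, List.foldl_nil]
    rw [hS, List.range_succ]
    simp

theorem B_char (pts : List Int) :
    transform_to_sum_5_alt pts
      = [0] ++ (List.range (pts.length - 1)).map (fun k => win pts (k + 1)) := by
  unfold transform_to_sum_5_alt
  cases hl : pts.length with
  | zero =>
    rw [show ((0 : Nat) : Int) = 0 from rfl, PySem.List.pyRange_one_eq_nil (by omega)]
    simp
  | succ n =>
    have h1 : ((n + 1 : Nat) : Int) = 1 + (n : Int) := by push_cast; ring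
    rw [h1, B_invariant pts n (by omega)]
    simp

-- ===== VERDICT (by name: the statement is the Claim_ definition above) =====
theorem transform_to_sum_5_spec : Claim_equal_transform_to_sum_5 := by
  intro points _
  unfold Spec_transform_to_sum_5
  rw [A_char, B_char]
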